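-- pv_equiv track=rewrite | github.com/SoNotWildTurtle/Coliseum | hololive_coliseum/auto_dev_implementation_manager.py | _backlog
-- ===== SOURCE A (Python) =====
-- from typing import Any, Mapping, Sequence
--
-- def _backlog(
--     scheduled: Sequence[Mapping[str, Any]] | None,
--     modernization_targets: Sequence[Mapping[str, Any]] | None,
-- ) -> tuple[dict[str, Any], ...]:
--     backlog: list[dict[str, Any]] = []
--     for task in scheduled or ():
--         if not isinstance(task, Mapping):
--             continue
--         backlog.append(
--             {
--                 "domain": str(task.get("domain", "remediation")),
--                 "task": str(task.get("task", ""))[:72],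
--                 "severity": str(task.get("severity", "medium")),
--             }
--         )
--     for target in modernization_targets or ():
--         if not isinstance(target, Mapping):
--             continue
--         backlog.append(
--             {
--                 "domain": "modernization",
--                 "task": str(target.get("name", "upgrade")),
--                 "severity": "high",
--             }
--         )
--     unique: list[dict[str, Any]] = []
--     seen: set[tuple[str, str]] = set()
--     for item in backlog:
--         key = (item.get("domain", ""), item.get("task", ""))
--         if key in seen:
--             continue
--         seen.add(key)
--         unique.append(item)
--     return tuple(unique[:10])
-- ===== SOURCE B (Python) =====
-- from typing import Any, Mapping, Sequence
--
-- def _backlog(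
--     scheduled: Sequence[Mapping[str, Any]] | None,
--     modernization_targets: Sequence[Mapping[str, Any]] | None,
-- ) -> tuple[dict[str, Any], ...]:
--     # Single fused pass: build, deduplicate and cap at 10 on the fly, never
--     # materialising the intermediate backlog list.
--     seen: set[tuple[str, str]] = set()
--     unique: list[dict[str, Any]] = []
--     for task in scheduled or ():
--         if not isinstance(task, Mapping):
--             continue
--         domain = str(task.get("domain", "remediation"))
--         text = str(task.get("task", ""))[:72]
--         key = (domain, text)
--         if key in seen:
--             continue
--         seen.add(key)
--         unique.append({"domain": domain, "task": text,
--                        "severity": str(task.get("severity", "medium"))})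
--         if len(unique) == 10:
--             return tuple(unique)
--     for target in modernization_targets or ():
--         if not isinstance(target, Mapping):
--             continue
--         name = str(target.get("name", "upgrade"))
--         key = ("modernization", name)
--         if key in seen:
--             continue
--         seen.add(key)
--         unique.append({"domain": "modernization", "task": name,
--                        "severity": "high"})
--         if len(unique) == 10:
--             return tuple(unique)
--     return tuple(unique)
-- ===== Notes on version B (the rewrite author's own statement) =====
-- stated objective: alternative
-- what changed: Fuses A's three passes (build backlog, dedup, slice to 10) into one streaming pass that deduplicates while building and returns as soon as 10 distinct items exist, never materialising the intermediate backlog list.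
import Mathlib
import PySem

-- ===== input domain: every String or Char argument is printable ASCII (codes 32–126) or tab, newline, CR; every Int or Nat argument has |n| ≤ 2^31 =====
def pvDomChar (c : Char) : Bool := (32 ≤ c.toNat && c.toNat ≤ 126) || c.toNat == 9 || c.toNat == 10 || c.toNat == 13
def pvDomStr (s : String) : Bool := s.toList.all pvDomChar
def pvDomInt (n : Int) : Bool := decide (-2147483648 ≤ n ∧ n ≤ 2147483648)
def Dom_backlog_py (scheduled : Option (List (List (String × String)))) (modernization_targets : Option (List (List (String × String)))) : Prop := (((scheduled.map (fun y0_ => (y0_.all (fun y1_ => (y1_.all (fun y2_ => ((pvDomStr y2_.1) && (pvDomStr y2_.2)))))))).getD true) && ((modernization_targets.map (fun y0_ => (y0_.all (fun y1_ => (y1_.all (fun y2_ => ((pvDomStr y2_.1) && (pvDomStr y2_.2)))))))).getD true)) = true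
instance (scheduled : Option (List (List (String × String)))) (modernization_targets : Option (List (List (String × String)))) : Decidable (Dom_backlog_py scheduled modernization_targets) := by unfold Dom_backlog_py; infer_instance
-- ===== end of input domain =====

-- B fuses A's build / dedup / slice-to-10 passes into one streaming pass with early return.
-- (All dict values are strings on this task's domain, so Python's str(...) is the identity.)

-- ===== PORT A =====
-- item built for a scheduled task (dict literal in source order)
def pvMkSched (t : List (String × String)) : List (String × String) :=
  [("domain", (PySem.Dict.mk t).getD "domain" "remediation"),
   ("task", PySem.Str.slice ((PySem.Dict.mk t).getD "task" "") none (some 72)),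
   ("severity", (PySem.Dict.mk t).getD "severity" "medium")]

-- item built for a modernization target
def pvMkMod (t : List (String × String)) : List (String × String) :=
  [("domain", "modernization"),
   ("task", (PySem.Dict.mk t).getD "name" "upgrade"),
   ("severity", "high")]

def backlog_py (scheduled : Option (List (List (String × String)))) (modernization_targets : Option (List (List (String × String)))) : List (List (String × String)) :=
  let backlog := (scheduled.getD []).foldl (fun acc t => acc ++ [pvMkSched t]) []
  let backlog := (modernization_targets.getD []).foldl (fun acc t => acc ++ [pvMkMod t]) backlog
  let p := backlog.foldl
    (fun (p : List (List (String × String)) × PySem.Set (String × String)) item =>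
      let key := ((PySem.Dict.mk item).getD "domain" "", (PySem.Dict.mk item).getD "task" "")
      if PySem.Set.contains p.2 key then p else (p.1 ++ [item], PySem.Set.add p.2 key))
    ([], PySem.Set.empty)
  PySem.List.slice p.1 none (some 10)

-- ===== PORT B =====
-- first loop of Source B: over scheduled; returns (unique, seen, early-returned?)
def pvGoSched : List (List (String × String)) → PySem.Set (String × String) → List (List (String × String)) → (List (List (String × String)) × PySem.Set (String × String) × Bool)
  | [], seen, unique => (unique, seen, false)
  | t :: rest, seen, unique =>
    let domain := (PySem.Dict.mk t).getD "domain" "remediation"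
    let text := PySem.Str.slice ((PySem.Dict.mk t).getD "task" "") none (some 72)
    let key := (domain, text)
    if PySem.Set.contains seen key then pvGoSched rest seen unique
    else
      let unique' := unique ++ [[("domain", domain), ("task", text),
                                 ("severity", (PySem.Dict.mk t).getD "severity" "medium")]]
      if unique'.length = 10 then (unique', PySem.Set.add seen key, true)
      else pvGoSched rest (PySem.Set.add seen key) unique'

-- second loop of Source B: over modernization_targets
def pvGoMod : List (List (String × String)) → PySem.Set (String × String) → List (List (String × String)) → (List (List (String × String)) × PySem.Set (String × String) × Bool)
  | [], seen, unique => (unique, seen, false)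
  | t :: rest, seen, unique =>
    let name := (PySem.Dict.mk t).getD "name" "upgrade"
    let key := (("modernization" : String), name)
    if PySem.Set.contains seen key then pvGoMod rest seen unique
    else
      let unique' := unique ++ [[("domain", ("modernization" : String)), ("task", name),
                                 ("severity", ("high" : String))]]
      if unique'.length = 10 then (unique', PySem.Set.add seen key, true)
      else pvGoMod rest (PySem.Set.add seen key) unique'

def backlog_py_alt (scheduled : Option (List (List (String × String)))) (modernization_targets : Option (List (List (String × String)))) : List (List (String × String)) :=
  let r := pvGoSched (scheduled.getD []) PySem.Set.empty []
  if r.2.2 then r.1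
  else (pvGoMod (modernization_targets.getD []) r.2.1 r.1).1

-- ===== PRECONDITION & SPEC =====
def Spec_backlog_py (scheduled : Option (List (List (String × String)))) (modernization_targets : Option (List (List (String × String)))) (out : List (List (String × String))) : Prop := out = backlog_py_alt scheduled modernization_targets
instance (scheduled : Option (List (List (String × String)))) (modernization_targets : Option (List (List (String × String)))) (out : List (List (String × String))) : Decidable (Spec_backlog_py scheduled modernization_targets out) := by unfold Spec_backlog_py; infer_instance

-- ===== CLAIM (what is proved, stated in full; the proofs are below) =====
def Claim_equal_backlog_py : Prop := ∀ (scheduled : Option (List (List (String × String)))) (modernization_targets : Option (List (List (String × String)))), Dom_backlog_py scheduled modernization_targets → Spec_backlog_py scheduled modernization_targets (backlog_py scheduled modernization_targets)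

-- ===== LEMMAS AND PROOFS =====

-- the key A's third loop extracts from an item
def pvKeyOf (item : List (String × String)) : String × String :=
  ((PySem.Dict.mk item).getD "domain" "", (PySem.Dict.mk item).getD "task" "")

-- A's dedup step and fold
def pvDstep (p : List (List (String × String)) × PySem.Set (String × String)) (item : List (String × String)) : List (List (String × String)) × PySem.Set (String × String) :=
  if PySem.Set.contains p.2 (pvKeyOf item) then p else (p.1 ++ [item], PySem.Set.add p.2 (pvKeyOf item))

-- generic early-stopping dedup over a pre-built item stream
def pvGo : List (List (String × String)) → PySem.Set (String × String) → List (List (String × String)) → (List (List (String × String)) × PySem.Set (String × String) × Bool)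
  | [], seen, unique => (unique, seen, false)
  | it :: rest, seen, unique =>
    if PySem.Set.contains seen (pvKeyOf it) then pvGo rest seen unique
    else
      let unique' := unique ++ [it]
      if unique'.length = 10 then (unique', PySem.Set.add seen (pvKeyOf it), true)
      else pvGo rest (PySem.Set.add seen (pvKeyOf it)) unique'

theorem pvKeyOf_lit (d t s : String) :
    pvKeyOf [("domain", d), ("task", t), ("severity", s)] = (d, t) := by
  simp [pvKeyOf, PySem.Dict.getD, PySem.Dict.get?]

theorem pvGoSched_eq_pvGo (ts : List (List (String × String))) (seen : PySem.Set (String × String)) (unique : List (List (String × String))) :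
    pvGoSched ts seen unique = pvGo (ts.map pvMkSched) seen unique := by
  induction ts generalizing seen unique with
  | nil => rfl
  | cons t rest ih =>
    simp only [List.map_cons, pvGoSched, pvGo, pvMkSched, pvKeyOf_lit]
    split_ifs <;> first | rfl | exact ih _ _

theorem pvGoMod_eq_pvGo (ts : List (List (String × String))) (seen : PySem.Set (String × String)) (unique : List (List (String × String))) :
    pvGoMod ts seen unique = pvGo (ts.map pvMkMod) seen unique := by
  induction ts generalizing seen unique with
  | nil => rfl
  | cons t rest ih =>
    simp only [List.map_cons, pvGoMod, pvGo, pvMkMod, pvKeyOf_lit]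
    split_ifs <;> first | rfl | exact ih _ _

theorem pvFoldl_append (f : List (String × String) → List (String × String)) (ts : List (List (String × String))) (acc : List (List (String × String))) :
    ts.foldl (fun acc t => acc ++ [f t]) acc = acc ++ ts.map f := by
  induction ts generalizing acc with
  | nil => simp
  | cons t rest ih => simp [ih]

-- A's fold only extends the unique list
theorem pvDfold_prefix (items : List (List (String × String))) (p : List (List (String × String)) × PySem.Set (String × String)) :
    ∃ ext, (items.foldl pvDstep p).1 = p.1 ++ ext := by
  induction items generalizing p with
  | nil => exact ⟨[], by simp⟩
  | cons it rest ih =>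
    simp only [List.foldl_cons, pvDstep]
    split_ifs with h
    · exact ih p
    · obtain ⟨ext, he⟩ := ih (p.1 ++ [it], PySem.Set.add p.2 (pvKeyOf it))
      exact ⟨[it] ++ ext, by simpa using he⟩

-- the main invariant relating the early-stopping pass to A's pure fold
theorem pvGo_spec (items : List (List (String × String))) (seen : PySem.Set (String × String)) (unique : List (List (String × String))) (h : unique.length < 10) :
    (pvGo items seen unique).1 = (items.foldl pvDstep (unique, seen)).1.take 10
    ∧ ((pvGo items seen unique).2.2 = true → (pvGo items seen unique).1.length = 10)
    ∧ ((pvGo items seen unique).2.2 = false →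
        pvGo items seen unique = ((items.foldl pvDstep (unique, seen)).1, (items.foldl pvDstep (unique, seen)).2, false)
        ∧ (items.foldl pvDstep (unique, seen)).1.length < 10) := by
  induction items generalizing seen unique with
  | nil =>
    refine ⟨?_, by simp [pvGo], fun _ => ⟨rfl, h⟩⟩
    simp [pvGo, List.take_of_length_le (Nat.le_of_lt h)]
  | cons it rest ih =>
    simp only [pvGo, List.foldl_cons, pvDstep]
    split_ifs with hmem hlen
    · exact ih seen unique h
    · -- early return: unique' has length 10
      refine ⟨?_, fun _ => hlen, by simp⟩
      obtain ⟨ext, he⟩ := pvDfold_prefix rest (unique ++ [it], PySem.Set.add seen (pvKeyOf it))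
      simp only at he
      rw [he, List.take_append_of_le_length (by omega), List.take_of_length_le (by omega)]
    · -- continue: unique' still short
      have hlt : (unique ++ [it]).length < 10 := by
        simp only [List.length_append, List.length_cons, List.length_nil] at hlen ⊢; omega
      exact ih (PySem.Set.add seen (pvKeyOf it)) (unique ++ [it]) hlt

theorem pvDfold_append (xs ys : List (List (String × String))) (p : List (List (String × String)) × PySem.Set (String × String)) :
    (xs ++ ys).foldl pvDstep p = ys.foldl pvDstep (xs.foldl pvDstep p) := by
  simp [List.foldl_append]

-- ===== VERDICT (by name: the statement is the Claim_ definition above) =====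
theorem backlog_py_spec : Claim_equal_backlog_py := by
  intro scheduled modernization_targets _
  unfold Spec_backlog_py backlog_py backlog_py_alt
  simp only [pvFoldl_append, List.nil_append]
  set X := (scheduled.getD []).map pvMkSched with hX
  set Y := (modernization_targets.getD []).map pvMkMod with hY
  rw [pvGoSched_eq_pvGo, ← hX]
  have hA : (List.foldl
      (fun (p : List (List (String × String)) × PySem.Set (String × String)) item =>
        if PySem.Set.contains p.2 ((PySem.Dict.mk item).getD "domain" "", (PySem.Dict.mk item).getD "task" "") then p
        else (p.1 ++ [item], PySem.Set.add p.2 ((PySem.Dict.mk item).getD "domain" "", (PySem.Dict.mk item).getD "task" ""))) ([], PySem.Set.empty) (X ++ Y))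
      = (X ++ Y).foldl pvDstep ([], PySem.Set.empty) := rfl
  have h0 : ([] : List (List (String × String))).length < 10 := by simp
  obtain ⟨h1, h2, h3⟩ := pvGo_spec X PySem.Set.empty [] h0
  have hslice : PySem.List.slice ((X ++ Y).foldl pvDstep ([], PySem.Set.empty)).1 none (some 10)
      = ((X ++ Y).foldl pvDstep ([], PySem.Set.empty)).1.take 10 := by
    exact_mod_cast PySem.List.slice_to_natCast ((X ++ Y).foldl pvDstep ([], PySem.Set.empty)).1 10
  rw [hA, hslice]
  by_cases hf : (pvGo X PySem.Set.empty []).2.2 = true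
  · -- early return in the first loop
    simp only [hf, if_true]
    rw [pvDfold_append]
    obtain ⟨ext, he⟩ := pvDfold_prefix Y (X.foldl pvDstep ([], PySem.Set.empty))
    rw [he, List.take_append_of_le_length]
    · exact h1.symm
    · have := h2 hf
      rw [h1, List.length_take] at this
      omega
  · -- first loop finished normally; continue with the second
    simp only [Bool.not_eq_true] at hf
    obtain ⟨heq, hlt⟩ := h3 hf
    simp only [hf, Bool.false_eq_true, if_false]
    rw [pvGoMod_eq_pvGo, ← hY, heq]
    obtain ⟨g1, _, _⟩ := pvGo_spec Y (X.foldl pvDstep ([], PySem.Set.empty)).2 (X.foldl pvDstep ([], PySem.Set.empty)).1 hlt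
    rw [pvDfold_append]
    exact g1.symm
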